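-- pv_equiv track=rewrite | github.com/aszokalski/Logia | Etap 3/Logia07/Zad3.py | ilemax2
-- ===== SOURCE A (Python) =====
-- def ilemax2(lista):
--     lista.sort()
--     dlugosci = []
--     for i in range(len(lista)):
--         zrodlo = lista[:i]
--         c = lista[i]
--         dlug = 0
--         proc = []
--         for a, b in zip(zrodlo, zrodlo[1:] + [0]):
--             if a + b > c:
--                 dlug += 3
--
--         dlugosci.append(dlug)
--
--     return max(dlugosci)
-- ===== SOURCE B (Python) =====
-- def ilemax2(lista):
--     # sorts lista in place like the original; return-value equivalence is what is claimed
--     lista.sort()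
--     n = len(lista)
--     sums = [lista[j] + lista[j + 1] for j in range(n - 1)]
--     best = 0
--     for i in range(n):
--         m = i - 1
--         lo = 0
--         hi = m
--         while lo < hi:
--             mid = (lo + hi) // 2
--             if sums[mid] <= lista[i]:
--                 lo = mid + 1
--             else:
--                 hi = mid
--         if 3 * (m - lo) > best:
--             best = 3 * (m - lo)
--     return best
-- ===== Notes on version B (the rewrite author's own statement) =====
-- stated objective: faster
-- what changed: Instead of re-slicing the prefix and rescanning all consecutive-pair sums for every index (O(n^2)), B sorts once, builds the nondecreasing array of consecutive-pair sums once, and counts the sums exceeding each element by a hand-written binary search (the last zip pair (lista[i-1], 0) can never exceed lista[i] in a sorted list, so it is dropped).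
import Mathlib
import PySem

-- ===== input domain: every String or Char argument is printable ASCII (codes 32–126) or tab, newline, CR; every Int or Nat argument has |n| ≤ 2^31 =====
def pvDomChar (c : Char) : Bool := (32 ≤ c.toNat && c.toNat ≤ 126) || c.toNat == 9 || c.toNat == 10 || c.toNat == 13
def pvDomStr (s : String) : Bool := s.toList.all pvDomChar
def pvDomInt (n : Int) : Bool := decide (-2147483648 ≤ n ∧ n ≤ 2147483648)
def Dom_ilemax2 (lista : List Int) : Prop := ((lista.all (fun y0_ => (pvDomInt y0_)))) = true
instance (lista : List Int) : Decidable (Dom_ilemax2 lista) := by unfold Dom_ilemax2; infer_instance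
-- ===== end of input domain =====

-- B replaces A's per-index rescan of all consecutive-pair sums by one sorted pass plus a
-- binary search per index (both sort the argument in place; the claim is about the return value).

-- ===== PORT A =====
def ilemax2 (lista : List Int) : Int :=
  let s := PySem.List.sorted lista (fun x => x) false
  let dlugosci := (PySem.List.pyRange 0 (s.length : Int) 1).foldl
    (fun (acc : List Int) (i : Int) =>
      let zrodlo := PySem.List.slice s none (some i)
      let c := PySem.List.pyGetD s i 0
      let dlug := (zrodlo.zip (PySem.List.slice zrodlo (some 1) none ++ [(0 : Int)])).foldl
        (fun d ab => if ab.1 + ab.2 > c then d + 3 else d) 0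
      acc ++ [dlug]) []
  match PySem.List.max? dlugosci (fun x => x) with
  | some m => m
  | none => 0          -- unreachable under Pre_: max() of the empty list raises in Python

-- ===== PORT B =====
-- the while-loop of Source B, recursion on the shrinking interval
def bsearchB (sums : List Int) (c : Int) (lo hi : Int) : Int :=
  if _h : lo < hi then
    if PySem.List.pyGetD sums (PySem.Int.floordiv (lo + hi) 2) 0 ≤ c then
      bsearchB sums c (PySem.Int.floordiv (lo + hi) 2 + 1) hi
    else bsearchB sums c lo (PySem.Int.floordiv (lo + hi) 2)
  else lo
termination_by (hi - lo).toNat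
decreasing_by
  · have hb := PySem.Int.floordiv_two_mid_bounds (le_of_lt _h)
    omega
  · have h2 : PySem.Int.floordiv (lo + hi) 2 < hi := by
      rw [PySem.Int.floordiv_lt_iff_lt_mul (by omega)]; omega
    omega

def ilemax2_alt (lista : List Int) : Int :=
  let s := PySem.List.sorted lista (fun x => x) false
  let n : Int := s.length
  let sums := (PySem.List.pyRange 0 (n - 1) 1).map
    (fun j => PySem.List.pyGetD s j 0 + PySem.List.pyGetD s (j + 1) 0)
  (PySem.List.pyRange 0 n 1).foldl
    (fun best i =>
      let m := i - 1
      let lo := bsearchB sums (PySem.List.pyGetD s i 0) 0 m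
      if 3 * (m - lo) > best then 3 * (m - lo) else best) 0

-- ===== PRECONDITION & SPEC =====
-- Pre_ excludes only the empty list, on which A's max() raises ValueError.
def Pre_ilemax2 (lista : List Int) : Prop := lista ≠ []
instance (lista : List Int) : Decidable (Pre_ilemax2 lista) := by unfold Pre_ilemax2; infer_instance
def pvWitness_ilemax2 : List Int := [3, 1, 2]

def Spec_ilemax2 (lista : List Int) (out : Int) : Prop := out = ilemax2_alt lista
instance (lista : List Int) (out : Int) : Decidable (Spec_ilemax2 lista out) := by unfold Spec_ilemax2; infer_instance

-- ===== CLAIM (what is proved, stated in full; the proofs are below) =====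
def Claim_equal_ilemax2 : Prop := ∀ (lista : List Int), Dom_ilemax2 lista → Pre_ilemax2 lista → Spec_ilemax2 lista (ilemax2 lista)
-- ===== LEMMAS AND PROOFS =====

-- the list of consecutive-pair sums of s
def sumsOf (s : List Int) : List Int := (s.zip (s.drop 1)).map (fun ab => ab.1 + ab.2)

theorem foldl_if3 (c : Int) :
    ∀ (l : List (Int × Int)) (a : Int),
      l.foldl (fun d ab => if ab.1 + ab.2 > c then d + 3 else d) a
        = a + 3 * (l.countP (fun ab => decide (ab.1 + ab.2 > c)) : Int) := by
  intro l
  induction l with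
  | nil => intro a; simp
  | cons x t ih =>
    intro a
    simp only [List.foldl_cons, List.countP_cons, ih]
    split_ifs <;> simp_all <;> omega


theorem zip_shift : ∀ (l : List Int) (x : Int),
    l.zip (l.drop 1 ++ [x]) =
      l.zip (l.drop 1) ++ (match l.getLast? with | some a => [(a, x)] | none => []) := by
  intro l x
  induction l with
  | nil => simp
  | cons a t ih =>
    cases t with
    | nil => simp
    | cons b t' =>
      simp only [List.drop_succ_cons, List.drop_zero] at ih ⊢
      simp only [List.cons_append, List.zip_cons_cons, List.getLast?_cons_cons]
      rw [ih]


theorem pairs_take : ∀ (l : List Int) (i : Nat),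
    (l.take i).zip ((l.take i).drop 1) = (l.zip (l.drop 1)).take (i - 1) := by
  intro l
  induction l with
  | nil => simp
  | cons a t ih =>
    intro i
    match i with
    | 0 => simp
    | 1 => cases t <;> simp
    | (k + 2) =>
      cases t with
      | nil => simp
      | cons b t' =>
        simp only [List.take_succ_cons, List.drop_succ_cons, List.drop_zero,
          List.zip_cons_cons]
        have := ih (k + 1)
        simp only [List.take_succ_cons, List.drop_succ_cons, List.drop_zero,
          Nat.add_sub_cancel] at this
        rw [show k + 2 - 1 = k + 1 from rfl, List.take_succ_cons]
        rw [this]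


theorem sums_port_eq (s : List Int) :
    (PySem.List.pyRange 0 ((s.length : Int) - 1) 1).map
      (fun j => PySem.List.pyGetD s j 0 + PySem.List.pyGetD s (j + 1) 0) = sumsOf s := by
  cases s with
  | nil => rfl
  | cons a t =>
    have hlen : ((a :: t).length : Int) - 1 = (t.length : Int) := by
      simp
    rw [hlen, PySem.List.pyRange_zero_natCast, List.map_map]
    apply List.ext_getElem
    · simp [sumsOf, List.length_zip]
    · intro k h1 h2
      have hk : k < t.length := by simpa using h1
      simp only [List.getElem_map, List.getElem_range, Function.comp_apply]
      have c1 : ((k : Int) + 1) = ((k + 1 : Nat) : Int) := by push_cast; ring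
      have hk1 : k < (a :: t).length := by simp; omega
      have hk2 : k + 1 < (a :: t).length := by simp; omega
      rw [c1, PySem.List.pyGetD_natCast, PySem.List.pyGetD_natCast,
        List.getD_eq_getElem _ _ hk1, List.getD_eq_getElem _ _ hk2]
      simp [sumsOf, List.getElem_zip]

theorem bsearch_spec (sums : List Int) (c : Int)
    (hmono : ∀ (p q : Nat), p ≤ q → q < sums.length → sums.getD p 0 ≤ sums.getD q 0) :
    ∀ (lo hi : Int), 0 ≤ lo → lo ≤ hi → hi ≤ (sums.length : Int) →
      lo ≤ bsearchB sums c lo hi ∧ bsearchB sums c lo hi ≤ hi ∧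
      (∀ j : Nat, lo ≤ (j : Int) → (j : Int) < bsearchB sums c lo hi → sums.getD j 0 ≤ c) ∧
      (∀ j : Nat, bsearchB sums c lo hi ≤ (j : Int) → (j : Int) < hi → c < sums.getD j 0) := by
  have key : ∀ (n : Nat) (lo hi : Int), (hi - lo).toNat = n → 0 ≤ lo → lo ≤ hi → hi ≤ (sums.length : Int) →
      lo ≤ bsearchB sums c lo hi ∧ bsearchB sums c lo hi ≤ hi ∧
      (∀ j : Nat, lo ≤ (j : Int) → (j : Int) < bsearchB sums c lo hi → sums.getD j 0 ≤ c) ∧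
      (∀ j : Nat, bsearchB sums c lo hi ≤ (j : Int) → (j : Int) < hi → c < sums.getD j 0) := by
    intro n
    induction n using Nat.strong_induction_on with
    | _ n ih =>
      intro lo hi hn h0 hlh hhl
      rw [bsearchB]
      by_cases hlt : lo < hi
      · rw [dif_pos hlt]
        have hb := PySem.Int.floordiv_two_mid_bounds (le_of_lt hlt)
        have hmlt : PySem.Int.floordiv (lo + hi) 2 < hi := by
          rw [PySem.Int.floordiv_lt_iff_lt_mul (by omega)]; omega
        set mid := PySem.Int.floordiv (lo + hi) 2 with hmid
        have hmidnn : 0 ≤ mid := by omega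
        have hmtn : mid < (sums.length : Int) := by omega
        have hmidc : mid = ((mid.toNat : Nat) : Int) := by omega
        have hget : PySem.List.pyGetD sums mid 0 = sums.getD mid.toNat 0 := by
          conv_lhs => rw [hmidc]
          rw [PySem.List.pyGetD_natCast]
        rw [hget]
        by_cases hc : sums.getD mid.toNat 0 ≤ c
        · rw [if_pos hc]
          obtain ⟨i1, i2, i3, i4⟩ := ih (hi - (mid + 1)).toNat (by omega) (mid + 1) hi rfl
            (by omega) (by omega) hhl
          refine ⟨by omega, i2, ?_, i4⟩
          intro j hj1 hj2
          by_cases hjm : (j : Int) < mid + 1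
          · exact le_trans (hmono j mid.toNat (by omega) (by omega)) hc
          · exact i3 j (by omega) hj2
        · rw [if_neg hc]
          obtain ⟨i1, i2, i3, i4⟩ := ih (mid - lo).toNat (by omega) lo mid rfl
            h0 (by omega) (by omega)
          refine ⟨i1, by omega, i3, ?_⟩
          intro j hj1 hj2
          by_cases hjm : (j : Int) < mid
          · exact i4 j hj1 hjm
          · refine lt_of_lt_of_le (lt_of_not_ge hc) (hmono mid.toNat j (by omega) (by omega))
      · rw [dif_neg hlt]
        exact ⟨le_refl _, by omega, fun j h1 h2 => by omega, fun j h1 h2 => by omega⟩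
  intro lo hi h0 h1 h2
  exact key _ lo hi rfl h0 h1 h2

theorem count_cut (sums : List Int) (c : Int) (m' r : Nat) (hr : r ≤ m') (hm : m' ≤ sums.length)
    (h1 : ∀ j : Nat, j < r → sums.getD j 0 ≤ c)
    (h2 : ∀ j : Nat, r ≤ j → j < m' → c < sums.getD j 0) :
    (sums.take m').countP (fun x => decide (c < x)) = m' - r := by
  have hlen : (sums.take m').length = m' := by simp [hm]
  conv_lhs => rw [← List.take_append_drop r (sums.take m')]
  rw [List.countP_append]
  have hA : ((sums.take m').take r).countP (fun x => decide (c < x)) = 0 := by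
    apply List.countP_eq_zero.2
    intro x hx
    obtain ⟨k, hk, rfl⟩ := List.mem_iff_getElem.1 hx
    have hk' : k < r := by simp [hlen] at hk; omega
    have hkm : k < m' := lt_of_lt_of_le hk' hr
    have : ((sums.take m').take r)[k] = sums[k]'(lt_of_lt_of_le hkm hm) := by
      simp [List.getElem_take]
    rw [this]
    have := h1 k hk'
    rw [List.getD_eq_getElem _ _ (lt_of_lt_of_le hkm hm)] at this
    simpa using not_lt_of_ge this
  have hB : ((sums.take m').drop r).countP (fun x => decide (c < x)) = m' - r := by
    rw [List.countP_eq_length.2]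
    · simp [hlen]
    · intro x hx
      obtain ⟨k, hk, rfl⟩ := List.mem_iff_getElem.1 hx
      have hk' : k < m' - r := by simp [hlen] at hk; omega
      have hrk : r + k < m' := by omega
      have : ((sums.take m').drop r)[k] = sums[r + k]'(lt_of_lt_of_le hrk hm) := by
        simp [List.getElem_drop, List.getElem_take]
      rw [this]
      have := h2 (r + k) (by omega) hrk
      rw [List.getD_eq_getElem _ _ (lt_of_lt_of_le hrk hm)] at this
      simpa using this
  rw [hA, hB]
  omega

theorem sumsOf_length (s : List Int) : (sumsOf s).length = s.length - 1 := by
  simp [sumsOf, List.length_zip]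

theorem sumsOf_getD (s : List Int) (j : Nat) (hj : j < (sumsOf s).length) :
    (sumsOf s).getD j 0 = s.getD j 0 + s.getD (j + 1) 0 := by
  have hl := sumsOf_length s
  have hj1 : j + 1 < s.length := by omega
  rw [List.getD_eq_getElem _ _ hj, List.getD_eq_getElem _ _ (by omega),
    List.getD_eq_getElem _ _ hj1]
  simp [sumsOf, List.getElem_zip]

theorem foldl_appsing {α β : Type} (f : α → β) :
    ∀ (l : List α) (acc : List β), l.foldl (fun a x => a ++ [f x]) acc = acc ++ l.map f := by
  intro l
  induction l with
  | nil => intro acc; simp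
  | cons x t ih => intro acc; simp [ih]

theorem foldl_if_max (v : Nat → Int) :
    ∀ (l : List Nat) (a : Int),
      l.foldl (fun b k => if v k > b then v k else b) a = l.foldl (fun b k => max b (v k)) a := by
  intro l
  induction l with
  | nil => intro a; rfl
  | cons x t ih =>
    intro a
    simp only [List.foldl_cons, ih]
    congr 1
    rw [max_def]
    split_ifs <;> omega

theorem foldl_max_congr (f g : Nat → Int) :
    ∀ (l : List Nat) (a : Int), (∀ x ∈ l, f x = g x) →
      l.foldl (fun b k => max b (f k)) a = l.foldl (fun b k => max b (g k)) a := by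
  intro l
  induction l with
  | nil => intro a _; rfl
  | cons x t ih =>
    intro a h
    simp only [List.foldl_cons]
    rw [h x (by simp), ih _ (fun y hy => h y (by simp [hy]))]

theorem apart (s : List Int)
    (smono : ∀ p q : Nat, p ≤ q → q < s.length → s.getD p 0 ≤ s.getD q 0)
    (i : Nat) (hi : i < s.length) :
    ((s.take i).zip ((s.take i).drop 1 ++ [(0 : Int)])).foldl
      (fun d ab => if ab.1 + ab.2 > s.getD i 0 then d + 3 else d) 0
      = 3 * ((((sumsOf s).take (i - 1)).countP (fun x => decide (s.getD i 0 < x))) : Int) := by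
  rw [foldl_if3 (s.getD i 0)]
  rw [zip_shift, List.countP_append]
  cases Nat.eq_zero_or_pos i with
  | inl h0 => subst h0; simp
  | inr hpos =>
    obtain ⟨j, rfl⟩ : ∃ j, i = j + 1 := ⟨i - 1, by omega⟩
    have hj : j < s.length := by omega
    have htake : s.take (j + 1) = s.take j ++ [s[j]'hj] := by
      rw [List.take_add_one, List.getElem?_eq_getElem hj]
      rfl
    have hlast : (s.take (j + 1)).getLast? = some (s[j]'hj) := by
      rw [htake, List.getLast?_concat]
    rw [hlast]
    have hzero : List.countP (fun ab => decide (ab.1 + ab.2 > s.getD (j + 1) 0))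
        [(s[j]'hj, (0 : Int))] = 0 := by
      have h1 := smono j (j + 1) (by omega) hi
      rw [List.getD_eq_getElem _ _ hj] at h1
      simp only [List.countP_cons, List.countP_nil, Nat.zero_add]
      rw [if_neg]
      simp only [decide_eq_true_eq]
      omega
    rw [hzero, pairs_take]
    simp only [Nat.add_sub_cancel]
    have hmt : (sumsOf s).take j = ((s.zip (s.drop 1)).take j).map
        (fun ab => ab.1 + ab.2) := by
      simp [sumsOf, List.map_take]
    rw [hmt, List.countP_map]
    have hcongr : ∀ q1 q2 : Int × Int → Bool, q1 = q2 →
        List.countP q1 ((s.zip (s.drop 1)).take j) =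
        List.countP q2 ((s.zip (s.drop 1)).take j) := by intro q1 q2 h; rw [h]
    rw [hcongr (fun ab => decide (ab.1 + ab.2 > s.getD (j + 1) 0))
      ((fun x => decide (s.getD (j + 1) 0 < x)) ∘ fun ab => ab.1 + ab.2)
      (by funext ab; simp [Function.comp, gt_iff_lt])]
    omega

theorem bpart (s : List Int)
    (ssmono : ∀ p q : Nat, p ≤ q → q < (sumsOf s).length → (sumsOf s).getD p 0 ≤ (sumsOf s).getD q 0)
    (i : Nat) (h1 : 1 ≤ i) (h2 : i ≤ s.length) :
    3 * ((i : Int) - 1 - bsearchB (sumsOf s) (s.getD i 0) 0 ((i : Int) - 1))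
      = 3 * ((((sumsOf s).take (i - 1)).countP (fun x => decide (s.getD i 0 < x))) : Int) := by
  have hlen : (sumsOf s).length = s.length - 1 := sumsOf_length s
  have hi1 : (1 : Int) ≤ (i : Int) := by exact_mod_cast h1
  have hi2 : (i : Int) ≤ (s.length : Int) := by exact_mod_cast h2
  have hsl : (1 : Nat) ≤ s.length := le_trans h1 h2
  have hcast : ((sumsOf s).length : Int) = (s.length : Int) - 1 := by
    rw [hlen]; omega
  obtain ⟨b1, b2, b3, b4⟩ := bsearch_spec (sumsOf s) (s.getD i 0) ssmono 0 ((i : Int) - 1)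
    le_rfl (by omega) (by omega)
  set r := bsearchB (sumsOf s) (s.getD i 0) 0 ((i : Int) - 1) with hr
  have hcut := count_cut (sumsOf s) (s.getD i 0) (i - 1) r.toNat (by omega) (by omega)
    (fun j hj => b3 j (by omega) (by omega))
    (fun j hja hjb => b4 j (by omega) (by omega))
  rw [hcut]
  omega

theorem ilemax2_spec : Claim_equal_ilemax2 := by
  intro lista _ hpre
  show ilemax2 lista = ilemax2_alt lista
  simp only [ilemax2, ilemax2_alt]
  rw [sums_port_eq]
  set s := PySem.List.sorted lista (fun x => x) false with hs
  have hsne : s ≠ [] := fun h => hpre (by rwa [hs, PySem.List.sorted_eq_nil_iff] at h)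
  obtain ⟨m, hm⟩ : ∃ m, s.length = m + 1 := by
    cases hsl : s.length with
    | zero => exact absurd (List.length_eq_zero_iff.1 hsl) hsne
    | succ m => exact ⟨m, rfl⟩
  have smono : ∀ p q : Nat, p ≤ q → q < s.length → s.getD p 0 ≤ s.getD q 0 := by
    intro p q hpq hq
    rw [List.getD_eq_getElem _ _ (lt_of_le_of_lt hpq hq), List.getD_eq_getElem _ _ hq]
    exact PySem.List.sorted_id_getElem_mono lista hpq hq
  have ssmono : ∀ p q : Nat, p ≤ q → q < (sumsOf s).length →
      (sumsOf s).getD p 0 ≤ (sumsOf s).getD q 0 := by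
    intro p q hpq hq
    have hl := sumsOf_length s
    rw [sumsOf_getD s p (by omega), sumsOf_getD s q hq]
    exact add_le_add (smono p q hpq (by omega)) (smono (p + 1) (q + 1) (by omega) (by omega))
  rw [foldl_appsing, PySem.List.pyRange_zero_natCast, List.map_map, List.foldl_map]
  simp only [Function.comp_def, List.nil_append, PySem.List.slice_to_natCast,
    PySem.List.slice_from_one, PySem.List.pyGetD_natCast, ← List.drop_one]
  have hmapA : (List.range s.length).map (fun k =>
        ((s.take k).zip ((s.take k).drop 1 ++ [(0 : Int)])).foldl
          (fun d ab => if ab.1 + ab.2 > s.getD k 0 then d + 3 else d) 0)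
      = (List.range s.length).map (fun k =>
        3 * ((((sumsOf s).take (k - 1)).countP (fun x => decide (s.getD k 0 < x))) : Int)) := by
    apply List.map_congr_left
    intro k hk
    rw [List.mem_range] at hk
    exact apart s smono k hk
  rw [hmapA]
  rw [foldl_if_max (fun k => 3 * ((k : Int) - 1 -
    bsearchB (sumsOf s) (s.getD k 0) 0 ((k : Int) - 1)))]
  rw [hm, List.range_succ_eq_map]
  simp only [List.map_cons, List.map_map, List.foldl_cons]
  have hb0 : bsearchB (sumsOf s) (s.getD 0 0) 0 (((0 : Nat) : Int) - 1) = 0 := by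
    rw [bsearchB, dif_neg (by norm_num)]
  rw [hb0]
  norm_num
  rw [PySem.List.max?_id_cons]
  split
  next x heq =>
    injection heq with heq2
    rw [← heq2]
    simp only [List.foldl_map, Function.comp_def]
    apply foldl_max_congr
    intro k hk
    rw [List.mem_range] at hk
    have hgd : ∀ (n : Nat), s[n]?.getD 0 = s.getD n 0 := fun n => rfl
    simp only [Nat.succ_eq_add_one, hgd]
    exact (bpart s ssmono (k + 1) (by omega) (by omega)).symm
  next heq => exact absurd heq (by simp)
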